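-- pv_equiv track=rewrite | github.com/allchemy-net/MCRcode | paths.py | checkTopoOrderWater
-- ===== SOURCE A (Python) =====
-- def checkTopoOrderWater(topoSort, rxdb):
--     waterCond = [rxdb[rx]['W/WF'] for rx in topoSort]
--     if 'W' in waterCond and 'WF' in waterCond:
--         W = [poz for poz, wc in enumerate(waterCond) if wc == 'W']
--         WF = [poz for poz, wc in enumerate(waterCond) if wc == 'WF']
--         if min(W) < max(WF):
--             return False
--     return True
-- ===== SOURCE B (Python) =====
-- def checkTopoOrderWater(topoSort, rxdb):
--     firstW = None
--     lastWF = None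
--     for i, rx in enumerate(topoSort):
--         wc = rxdb[rx]['W/WF']
--         if wc == 'W' and firstW is None:
--             firstW = i
--         elif wc == 'WF':
--             lastWF = i
--     if firstW is not None and lastWF is not None and firstW < lastWF:
--         return False
--     return True
-- ===== Notes on version B (the rewrite author's own statement) =====
-- stated objective: simpler
-- what changed: Replaces the intermediate waterCond list, the two enumerate-filter index lists and min/max calls by one pass over topoSort maintaining just two scalars (first 'W' index, last 'WF' index).
import Mathlib
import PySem

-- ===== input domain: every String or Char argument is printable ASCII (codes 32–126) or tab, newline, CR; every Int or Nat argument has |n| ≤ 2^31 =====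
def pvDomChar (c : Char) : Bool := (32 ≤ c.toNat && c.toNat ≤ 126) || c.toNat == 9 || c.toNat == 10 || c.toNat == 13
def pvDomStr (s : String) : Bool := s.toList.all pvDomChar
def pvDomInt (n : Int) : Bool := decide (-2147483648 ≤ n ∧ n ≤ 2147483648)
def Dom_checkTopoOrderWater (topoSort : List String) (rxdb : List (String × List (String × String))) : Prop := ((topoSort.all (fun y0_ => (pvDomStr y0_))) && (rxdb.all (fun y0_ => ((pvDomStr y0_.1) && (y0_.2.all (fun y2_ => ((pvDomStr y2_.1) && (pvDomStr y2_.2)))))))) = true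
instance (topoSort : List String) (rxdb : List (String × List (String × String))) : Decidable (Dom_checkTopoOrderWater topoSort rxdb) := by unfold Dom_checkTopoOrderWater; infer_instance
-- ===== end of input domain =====

-- B replaces A's intermediate waterCond list, two enumerate-filter index lists and min/max
-- calls by a single pass keeping two scalars (first 'W' index, last 'WF' index); return value only.

-- ===== PORT A =====
-- rxdb[rx]['W/WF']: association-list lookup (first match); on Pre_ inputs both lookups succeed,
-- so the "" / [] defaults are never the value used.
def pvLookupWWF (rxdb : List (String × List (String × String))) (rx : String) : String :=
  (((rxdb.lookup rx).getD []).lookup "W/WF").getD ""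

-- '[poz for poz, wc in enumerate(waterCond) if wc == s]' as structural recursion with a counter
def pvIdxs (s : String) (i : Nat) : List String → List Nat
  | [] => []
  | x :: rest => if x == s then i :: pvIdxs s (i + 1) rest else pvIdxs s (i + 1) rest

def checkTopoOrderWater (topoSort : List String) (rxdb : List (String × List (String × String))) : Bool :=
  let waterCond := topoSort.map (fun rx => pvLookupWWF rxdb rx)
  if waterCond.contains "W" && waterCond.contains "WF" then
    let W := pvIdxs "W" 0 waterCond
    let WF := pvIdxs "WF" 0 waterCond
    if (PySem.List.min? W (fun x => x)).getD 0 < (PySem.List.max? WF (fun x => x)).getD 0 then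
      false
    else true
  else true

-- ===== PORT B =====
-- the single loop of Source B: index counter, two Option Nat scalars
def pvGoB (rxdb : List (String × List (String × String))) :
    Nat → List String → Option Nat → Option Nat → Option Nat × Option Nat
  | _, [], firstW, lastWF => (firstW, lastWF)
  | i, rx :: rest, firstW, lastWF =>
      let wc := (((rxdb.lookup rx).getD []).lookup "W/WF").getD ""
      if wc == "W" && firstW.isNone then pvGoB rxdb (i + 1) rest (some i) lastWF
      else if wc == "WF" then pvGoB rxdb (i + 1) rest firstW (some i)
      else pvGoB rxdb (i + 1) rest firstW lastWF

def checkTopoOrderWater_alt (topoSort : List String) (rxdb : List (String × List (String × String))) : Bool :=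
  match pvGoB rxdb 0 topoSort none none with
  | (some w, some l) => if w < l then false else true
  | _ => true

-- ===== PRECONDITION & SPEC =====
-- Pre_ excludes exactly the inputs where Python A raises KeyError: some rx of topoSort missing
-- from rxdb, or its entry lacking the 'W/WF' key.
def Pre_checkTopoOrderWater (topoSort : List String) (rxdb : List (String × List (String × String))) : Prop :=
  ∀ rx ∈ topoSort, ((((rxdb.lookup rx).getD []).lookup "W/WF").isSome = true)
instance (topoSort : List String) (rxdb : List (String × List (String × String))) : Decidable (Pre_checkTopoOrderWater topoSort rxdb) := by unfold Pre_checkTopoOrderWater; infer_instance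

def pvWitness_checkTopoOrderWater : List String × (List (String × List (String × String))) :=
  (["r1", "r2"], [("r1", [("W/WF", "WF")]), ("r2", [("W/WF", "W")])])

def Spec_checkTopoOrderWater (topoSort : List String) (rxdb : List (String × List (String × String))) (out : Bool) : Prop := out = checkTopoOrderWater_alt topoSort rxdb
instance (topoSort : List String) (rxdb : List (String × List (String × String))) (out : Bool) : Decidable (Spec_checkTopoOrderWater topoSort rxdb out) := by unfold Spec_checkTopoOrderWater; infer_instance

-- ===== CLAIM (what is proved, stated in full; the proofs are below) =====
def Claim_equal_checkTopoOrderWater : Prop := ∀ (topoSort : List String) (rxdb : List (String × List (String × String))), Dom_checkTopoOrderWater topoSort rxdb → Pre_checkTopoOrderWater topoSort rxdb → Spec_checkTopoOrderWater topoSort rxdb (checkTopoOrderWater topoSort rxdb)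

-- ===== LEMMAS AND PROOFS =====

theorem getLast?_cons_or {α : Type} (a : α) (l : List α) :
    (a :: l).getLast? = l.getLast?.or (some a) := by
  induction l generalizing a with
  | nil => rfl
  | cons b t ih => rw [List.getLast?_cons_cons, ih b]; cases t.getLast? <;> rfl

theorem mem_pvIdxs_ge (s : String) : ∀ (wc : List String) (i j : Nat),
    j ∈ pvIdxs s i wc → i ≤ j := by
  intro wc
  induction wc with
  | nil => intro i j h; simp [pvIdxs] at h
  | cons x r ih =>
      intro i j h
      by_cases hx : x == s
      · simp [pvIdxs, hx] at h
        rcases h with h | h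
        · omega
        · have := ih (i + 1) j h; omega
      · simp [pvIdxs, hx] at h
        have := ih (i + 1) j h; omega

theorem pvIdxs_nil_iff (s : String) : ∀ (wc : List String) (i : Nat),
    pvIdxs s i wc = [] ↔ s ∉ wc := by
  intro wc
  induction wc with
  | nil => intro i; simp [pvIdxs]
  | cons x r ih =>
      intro i
      by_cases hx : x == s
      · have hx' : x = s := by simpa using hx
        simp [pvIdxs, hx']
      · have hx' : ¬ x = s := by simpa using hx
        simp [pvIdxs, hx, ih (i + 1)]
        intro h; exact fun he => hx' he.symm

theorem foldl_min_self {t : List Nat} {x : Nat} (h : ∀ y ∈ t, x ≤ y) :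
    t.foldl min x = x := by
  induction t with
  | nil => rfl
  | cons y r ih =>
      have hx : min x y = x := by
        have := h y (by simp); omega
      simp only [List.foldl_cons, hx]
      exact ih (fun z hz => h z (by simp [hz]))

theorem min?_pvIdxs (s : String) : ∀ (wc : List String) (i : Nat),
    PySem.List.min? (pvIdxs s i wc) (fun x => x) = (pvIdxs s i wc).head? := by
  intro wc
  induction wc with
  | nil => intro i; rfl
  | cons x r ih =>
      intro i
      by_cases hx : x == s
      · simp only [pvIdxs, hx, if_pos]
        rw [PySem.List.min?_id_cons]
        have : (pvIdxs s (i + 1) r).foldl min i = i :=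
          foldl_min_self (fun y hy => by
            have := mem_pvIdxs_ge s r (i + 1) y hy; omega)
        rw [this]; rfl
      · simp only [pvIdxs, hx, if_neg, Bool.false_eq_true, not_false_eq_true]
        exact ih (i + 1)

theorem max?_pvIdxs (s : String) : ∀ (wc : List String) (i : Nat),
    PySem.List.max? (pvIdxs s i wc) (fun x => x) = (pvIdxs s i wc).getLast? := by
  intro wc
  induction wc with
  | nil => intro i; rfl
  | cons x r ih =>
      intro i
      by_cases hx : x == s
      · simp only [pvIdxs, hx, if_pos]
        cases ht : pvIdxs s (i + 1) r with
        | nil => rw [PySem.List.max?_id_cons]; simp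
        | cons y t =>
            have hiy : i ≤ y := by
              have := mem_pvIdxs_ge s r (i + 1) y (by rw [ht]; simp); omega
            rw [PySem.List.max?_id_cons]
            have h1 : ((y :: t).foldl max i) = t.foldl max y := by
              simp only [List.foldl_cons]
              congr 1; omega
            have h2 : PySem.List.max? (y :: t) (fun x => x) = some (t.foldl max y) :=
              PySem.List.max?_id_cons y t
            have h3 := ih (i + 1)
            rw [ht] at h3
            rw [h1, getLast?_cons_or, ← h3, h2]
            rfl
      · simp only [pvIdxs, hx, if_neg, Bool.false_eq_true, not_false_eq_true]
        exact ih (i + 1)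

-- the loop of B computes: first 'W' index (if not already fixed) and last 'WF' index (overriding)
theorem pvGoB_spec (rxdb : List (String × List (String × String))) :
    ∀ (l : List String) (i : Nat) (fw lw : Option Nat),
    pvGoB rxdb i l fw lw =
      (fw.or (pvIdxs "W" i (l.map (fun rx => pvLookupWWF rxdb rx))).head?,
       ((pvIdxs "WF" i (l.map (fun rx => pvLookupWWF rxdb rx))).getLast?).or lw) := by
  intro l
  induction l with
  | nil => intro i fw lw; simp [pvGoB, pvIdxs]
  | cons rx rest ih =>
      intro i fw lw
      simp only [pvGoB, List.map_cons]
      set wc := (((rxdb.lookup rx).getD []).lookup "W/WF").getD "" with hwc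
      have hwcl : pvLookupWWF rxdb rx = wc := rfl
      by_cases hW : wc == "W"
      · have hW' : wc = "W" := by simpa using hW
        have hWF : ¬ (wc == "WF") := by simp [hW']
        cases fw with
        | none =>
            simp only [Option.isNone_none, hW, Bool.and_self, if_pos]
            rw [ih (i + 1) (some i) lw]
            simp [pvIdxs, hwcl, hW']
        | some w =>
            simp only [Option.isNone_some, Bool.and_false, Bool.false_eq_true, if_neg,
              not_false_eq_true, hWF, if_neg]
            rw [ih (i + 1) (some w) lw]
            simp [pvIdxs, hwcl, hW']
      · by_cases hWF : wc == "WF"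
        · have hWF' : wc = "WF" := by simpa using hWF
          simp only [hW, Bool.false_and, Bool.false_eq_true, if_neg, not_false_eq_true,
            hWF, if_pos]
          rw [ih (i + 1) fw (some i)]
          rw [hwcl, hWF']
          simp only [pvIdxs, beq_self_eq_true, if_pos, getLast?_cons_or]
          have : ¬ ("WF" == "W") = true := by decide
          simp [this]
        · simp only [hW, Bool.false_and, Bool.false_eq_true, if_neg, not_false_eq_true,
            hWF, if_neg]
          rw [ih (i + 1) fw lw]
          rw [hwcl]
          have hW' : ¬ wc = "W" := by simpa using hW
          have hWF' : ¬ wc = "WF" := by simpa using hWF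
          simp [pvIdxs, hW', hWF']

theorem checkTopoOrderWater_spec : Claim_equal_checkTopoOrderWater := by
  intro topoSort rxdb _hdom _hpre
  unfold Spec_checkTopoOrderWater checkTopoOrderWater checkTopoOrderWater_alt
  rw [pvGoB_spec rxdb topoSort 0 none none]
  set wc := topoSort.map (fun rx => pvLookupWWF rxdb rx) with hwc
  simp only [Option.or_none, Option.none_or]
  by_cases hW : "W" ∈ wc
  · by_cases hWF : "WF" ∈ wc
    · have hWn : pvIdxs "W" 0 wc ≠ [] := fun h => ((pvIdxs_nil_iff "W" wc 0).mp h) hW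
      have hWFn : pvIdxs "WF" 0 wc ≠ [] := fun h => ((pvIdxs_nil_iff "WF" wc 0).mp h) hWF
      obtain ⟨w, hw⟩ : ∃ w, (pvIdxs "W" 0 wc).head? = some w := by
        cases h : pvIdxs "W" 0 wc with
        | nil => exact absurd h hWn
        | cons a t => exact ⟨a, rfl⟩
      obtain ⟨f, hf⟩ : ∃ f, (pvIdxs "WF" 0 wc).getLast? = some f := by
        cases h : pvIdxs "WF" 0 wc with
        | nil => exact absurd h hWFn
        | cons a t => exact ⟨(a :: t).getLast (by simp), List.getLast?_eq_some_getLast (by simp)⟩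
      have hc : (wc.contains "W" && wc.contains "WF") = true := by
        have h1 : wc.contains "W" = true := by simpa using hW
        have h2 : wc.contains "WF" = true := by simpa using hWF
        rw [h1, h2]; rfl
      rw [if_pos hc, min?_pvIdxs, max?_pvIdxs, hw, hf]
      simp
    · have hn : pvIdxs "WF" 0 wc = [] := (pvIdxs_nil_iff "WF" wc 0).mpr hWF
      have hc : (wc.contains "W" && wc.contains "WF") = false := by
        have h2 : wc.contains "WF" = false := by simpa using hWF
        rw [h2, Bool.and_false]
      rw [if_neg (by rw [hc]; exact Bool.false_ne_true), hn]
      simp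
  · have hn : pvIdxs "W" 0 wc = [] := (pvIdxs_nil_iff "W" wc 0).mpr hW
    have hc : (wc.contains "W" && wc.contains "WF") = false := by
      have h1 : wc.contains "W" = false := by simpa using hW
      rw [h1, Bool.false_and]
    rw [if_neg (by rw [hc]; exact Bool.false_ne_true), hn]
    simp
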